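-- pv_equiv track=rewrite | github.com/Bruceey/Spider_Learning | 19、案例/实习僧/shi_xi_seng.py | get_real_string
-- ===== SOURCE A (Python) =====
-- def get_real_string(unicode_string, hex_charMap):
--     if unicode_string is None:
--         return ''
--     final_string = ''
--     for char in unicode_string:
--         tmp = hex_charMap.get(char)
--         if tmp:
--             final_string += tmp
--         else:
--             final_string += char
--     return final_string
-- ===== SOURCE B (Python) =====
-- def get_real_string(unicode_string, hex_charMap):
--     if unicode_string is None:
--         return ''
--     # keep only entries with a truthy replacement; falsy values fall back to the original char
--     repl = {k: v for k, v in hex_charMap.items() if v}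
--     pieces = []
--     n = len(unicode_string)
--     start = 0  # start of the current verbatim run
--     i = 0
--     while i < n:
--         v = repl.get(unicode_string[i])
--         if v is not None:
--             if start < i:
--                 pieces.append(unicode_string[start:i])
--             pieces.append(v)
--             start = i + 1
--         i += 1
--     if start < n:
--         pieces.append(unicode_string[start:])
--     return ''.join(pieces)
-- ===== Notes on version B (the rewrite author's own statement) =====
-- stated objective: alternative
-- what changed: A appends one piece per character (dict.get then branch, += each time); B first filters the map to its truthy entries, then does a gap-and-copy scan that keeps a run-start index, emits whole verbatim slices of the input between replacement points, and joins the collected pieces once at the end.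
import Mathlib
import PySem

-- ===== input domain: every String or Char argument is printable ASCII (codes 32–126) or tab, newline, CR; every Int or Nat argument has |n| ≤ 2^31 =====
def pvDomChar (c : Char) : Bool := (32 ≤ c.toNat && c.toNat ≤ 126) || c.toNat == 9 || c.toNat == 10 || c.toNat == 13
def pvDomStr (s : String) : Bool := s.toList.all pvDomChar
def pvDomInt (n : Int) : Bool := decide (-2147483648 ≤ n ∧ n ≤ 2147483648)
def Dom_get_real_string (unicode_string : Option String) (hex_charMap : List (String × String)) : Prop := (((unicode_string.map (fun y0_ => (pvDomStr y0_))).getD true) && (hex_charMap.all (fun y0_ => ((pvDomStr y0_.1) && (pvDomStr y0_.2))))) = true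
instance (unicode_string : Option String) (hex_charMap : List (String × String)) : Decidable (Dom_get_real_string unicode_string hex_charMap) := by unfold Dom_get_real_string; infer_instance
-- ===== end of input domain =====

-- B replaces A's per-character append loop by a gap-and-copy scan: it tracks the start of the
-- current unmapped run, emits whole verbatim slices between replacement points and joins the
-- collected pieces once at the end (alternative decomposition; not claimed faster).


-- ===== PORT A =====
-- hex_charMap is a Python dict; the association list stands for it via PySem.Dict.ofList.
def get_real_string (unicode_string : Option String) (hex_charMap : List (String × String)) : String :=
  match unicode_string with
  | none => ""
  | some s =>
    let d := PySem.Dict.ofList hex_charMap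
    s.toList.foldl (fun final_string char =>
      match d.get? (String.ofList [char]) with      -- tmp = hex_charMap.get(char)
      | some tmp => if tmp ≠ "" then final_string ++ tmp else final_string ++ String.ofList [char]
      | none => final_string ++ String.ofList [char]) ""

-- ===== PORT B =====
-- the while loop of Source B: i scans the string, start marks the current verbatim run,
-- pieces collects slices and replacements; ported as structural recursion on s.length - i
def pvLoopB (s : List Char) (repl : PySem.Dict String String) (i start : Nat)
    (pieces : List String) : List String :=
  if h : i < s.length then
    match repl.get? (String.ofList [s[i]]) with     -- v = repl.get(unicode_string[i])
    | some v =>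
        pvLoopB s repl (i + 1) (i + 1)
          ((if start < i
              then pieces ++ [String.ofList (PySem.List.slice s (some (start : Int)) (some (i : Int)))]
              else pieces) ++ [v])
    | none => pvLoopB s repl (i + 1) start pieces
  else
    if start < s.length
      then pieces ++ [String.ofList (PySem.List.slice s (some (start : Int)) none)]
      else pieces
termination_by s.length - i

def get_real_string_alt (unicode_string : Option String) (hex_charMap : List (String × String)) : String :=
  match unicode_string with
  | none => ""
  | some s =>
    -- repl = {k: v for k, v in hex_charMap.items() if v}
    let repl := PySem.Dict.ofList
      ((PySem.Dict.ofList hex_charMap).items.filter (fun p => p.2 ≠ ""))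
    String.join (pvLoopB s.toList repl 0 0 [])      -- ''.join(pieces)

-- ===== PRECONDITION & SPEC =====
def Spec_get_real_string (unicode_string : Option String) (hex_charMap : List (String × String)) (out : String) : Prop := out = get_real_string_alt unicode_string hex_charMap
instance (unicode_string : Option String) (hex_charMap : List (String × String)) (out : String) : Decidable (Spec_get_real_string unicode_string hex_charMap out) := by unfold Spec_get_real_string; infer_instance

-- ===== CLAIM (what is proved, stated in full; the proofs are below) =====
def Claim_equal_get_real_string : Prop := ∀ (unicode_string : Option String) (hex_charMap : List (String × String)), Dom_get_real_string unicode_string hex_charMap → Spec_get_real_string unicode_string hex_charMap (get_real_string unicode_string hex_charMap)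

-- ===== LEMMAS AND PROOFS =====

-- A's per-character step as a function of the character
def pvStepA (d : PySem.Dict String String) (c : Char) : String :=
  match d.get? (String.ofList [c]) with
  | some tmp => if tmp ≠ "" then tmp else String.ofList [c]
  | none => String.ofList [c]

theorem foldl_append_shift (x : String) (l : List String) :
    List.foldl (· ++ ·) x l = x ++ List.foldl (· ++ ·) "" l := by
  induction l generalizing x with
  | nil => simp
  | cons y t ih =>
    simp only [List.foldl_cons]
    rw [ih (x ++ y), ih ("" ++ y)]
    simp [String.append_assoc]

theorem join_cons (x : String) (l : List String) :
    String.join (x :: l) = x ++ String.join l :=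
  foldl_append_shift x l

theorem join_append_singleton (l : List String) (x : String) :
    String.join (l ++ [x]) = String.join l ++ x := by
  induction l with
  | nil => simp [String.join]
  | cons y t ih => rw [List.cons_append, join_cons, join_cons, ih, String.append_assoc]

-- a Dict built from a list with pairwise-distinct keys is that list verbatim
theorem ofList_eq_mk {κ ν : Type} [BEq κ] [LawfulBEq κ] (l : List (κ × ν)) (h : (l.map Prod.fst).Nodup) :
    PySem.Dict.ofList l = PySem.Dict.mk l := by
  apply PySem.Dict.ext
  have H := PySem.Dict.items_foldl_insert_fresh (l := l) (k := Prod.fst) (v := Prod.snd)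
      (d := PySem.Dict.empty) (by simp) h
  simpa using H

-- looking up in the truthiness-filtered dict = looking up then dropping empty values
theorem get?_mk_filter (l : List (String × String)) (h : (l.map Prod.fst).Nodup) (k : String) :
    (PySem.Dict.mk (l.filter (fun p => p.2 ≠ ""))).get? k
      = ((PySem.Dict.mk l).get? k).bind (fun t => if t = "" then none else some t) := by
  induction l with
  | nil => simp [PySem.Dict.get?]
  | cons p t ih =>
    rcases p with ⟨a, b⟩
    rw [List.map_cons, List.nodup_cons] at h
    rcases h with ⟨ha, ht⟩
    rw [List.filter_cons]
    by_cases hb : b = ""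
    · rw [if_neg (by simp [hb])]
      rw [ih ht, PySem.Dict.get?_mk_cons]
      by_cases hk : a = k
      · subst hk
        have h1 : (PySem.Dict.mk t).get? a = none := by
          rw [PySem.Dict.get?_eq_none_iff_not_mem_keys]
          simpa using ha
        rw [h1]
        simp [hb]
      · simp [beq_iff_eq, hk]
    · rw [if_pos (by simp [hb])]
      rw [PySem.Dict.get?_mk_cons, PySem.Dict.get?_mk_cons]
      by_cases hk : a = k
      · subst hk
        simp [hb]
      · have hak : (a == k) = false := by simpa using hk
        simp only [hak, Bool.false_eq_true, if_false]
        exact ih ht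

-- B's filtered dict resolves each character exactly as A's step does
theorem repl_get_eq (m : List (String × String)) (c : Char) :
    (match (PySem.Dict.ofList ((PySem.Dict.ofList m).items.filter (fun p => p.2 ≠ ""))).get?
        (String.ofList [c]) with
     | some v => v
     | none => String.ofList [c])
      = pvStepA (PySem.Dict.ofList m) c := by
  have hnd : (((PySem.Dict.ofList m).items).map Prod.fst).Nodup := by
    have := PySem.Dict.nodup_keys_ofList m
    simpa [PySem.Dict.keys] using this
  have hfnd : (((PySem.Dict.ofList m).items.filter (fun p => p.2 ≠ "")).map Prod.fst).Nodup :=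
    hnd.sublist (List.Sublist.map Prod.fst List.filter_sublist)
  rw [ofList_eq_mk _ hfnd, get?_mk_filter _ hnd]
  have hmk : PySem.Dict.mk (PySem.Dict.ofList m).items = PySem.Dict.ofList m := by
    apply PySem.Dict.ext; rfl
  rw [hmk]
  unfold pvStepA
  cases hg : (PySem.Dict.ofList m).get? (String.ofList [c]) with
  | none => simp
  | some v => by_cases hv : v = "" <;> simp [hv]

-- loop invariant for B's gap-and-copy scan
theorem pvLoopB_inv (s : List Char) (repl : PySem.Dict String String) (d : PySem.Dict String String)
    (hrepl : ∀ c : Char,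
      (match repl.get? (String.ofList [c]) with | some v => v | none => String.ofList [c]) = pvStepA d c) :
    ∀ (i start : Nat) (pieces : List String), start ≤ i →
      String.join (pvLoopB s repl i start pieces)
        = String.join pieces ++ String.ofList ((s.drop start).take (i - start))
            ++ String.join ((s.drop i).map (pvStepA d)) := by
  intro i
  induction hfuel : s.length - i using Nat.strong_induction_on generalizing i with
  | _ fuel ih =>
  intro start pieces hsi
  rw [pvLoopB]
  by_cases h : i < s.length
  · have hdropi : s.drop i = s[i] :: s.drop (i + 1) := List.drop_eq_getElem_cons h
    simp only [h, dif_pos]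
    cases hg : repl.get? (String.ofList [s[i]]) with
    | some v =>
      have hv : v = pvStepA d s[i] := by have := hrepl s[i]; rwa [hg] at this
      rw [ih (s.length - (i+1)) (by omega) (i+1) rfl (i+1) _ le_rfl]
      rw [join_append_singleton]
      have hpieces : String.join
          (if start < i
            then pieces ++ [String.ofList (PySem.List.slice s (some (start : Int)) (some (i : Int)))]
            else pieces)
          = String.join pieces ++ String.ofList ((s.drop start).take (i - start)) := by
        by_cases hlt : start < i
        · rw [if_pos hlt, join_append_singleton, PySem.List.slice_natCast]
        · have : start = i := by omega
          subst this
          simp [String.ofList_nil]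
      rw [hpieces, hdropi]
      simp only [List.map_cons, join_cons, Nat.sub_self, List.take_zero, String.ofList_nil]
      rw [← hv]
      simp [String.append_assoc]
    | none =>
      have hstep : pvStepA d s[i] = String.ofList [s[i]] := by
        have := hrepl s[i]
        rw [hg] at this
        exact this.symm
      rw [ih (s.length - (i+1)) (by omega) (i+1) rfl start _ (by omega)]
      have htake : (s.drop start).take (i + 1 - start)
          = (s.drop start).take (i - start) ++ [s[i]] := by
        have h1 : i + 1 - start = (i - start) + 1 := by omega
        rw [h1, List.take_add_one]
        have h2 : (s.drop start)[i - start]? = some s[i] := by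
          rw [List.getElem?_drop]
          have h3 : start + (i - start) = i := by omega
          rw [h3, List.getElem?_eq_getElem h]
        rw [h2]; rfl
      rw [htake, String.ofList_append, hdropi, List.map_cons, join_cons, hstep]
      simp [String.append_assoc]
  · simp only [h, dif_neg, not_false_iff]
    have hdropi : s.drop i = [] := List.drop_eq_nil_of_le (by omega)
    by_cases hs : start < s.length
    · rw [if_pos hs, join_append_singleton, PySem.List.slice_from_natCast]
      have : (s.drop start).take (i - start) = s.drop start := by
        apply List.take_of_length_le
        have := List.length_drop (l := s) (i := start)
        omega
      rw [this, hdropi]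
      simp [String.join]
    · rw [if_neg hs]
      have : s.drop start = [] := List.drop_eq_nil_of_le (by omega)
      rw [this, hdropi]
      simp [String.join, String.ofList_nil]

-- ===== VERDICT (by name: the statement is the Claim_ definition above) =====
theorem get_real_string_spec : Claim_equal_get_real_string := by
  intro us m _
  unfold Spec_get_real_string
  cases us with
  | none => rfl
  | some s =>
    simp only [get_real_string, get_real_string_alt]
    set repl := PySem.Dict.ofList ((PySem.Dict.ofList m).items.filter (fun p => p.2 ≠ "")) with hrepl_def
    have hinv := pvLoopB_inv s.toList repl (PySem.Dict.ofList m)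
      (fun c => repl_get_eq m c) 0 0 [] le_rfl
    rw [hinv]
    simp only [List.drop_zero, Nat.zero_sub, List.take_zero, String.join]
    have hfold : ∀ (l : List Char) (acc : String),
        l.foldl (fun final_string char =>
          match (PySem.Dict.ofList m).get? (String.ofList [char]) with
          | some tmp => if tmp ≠ "" then final_string ++ tmp else final_string ++ String.ofList [char]
          | none => final_string ++ String.ofList [char]) acc
          = acc ++ List.foldl (· ++ ·) "" (l.map (pvStepA (PySem.Dict.ofList m))) := by
      intro l
      induction l with
      | nil => simp
      | cons c t iht =>
        intro acc
        simp only [List.foldl_cons, List.map_cons]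
        rw [iht]
        have hstep : (match (PySem.Dict.ofList m).get? (String.ofList [c]) with
            | some tmp => if tmp ≠ "" then acc ++ tmp else acc ++ String.ofList [c]
            | none => acc ++ String.ofList [c]) = acc ++ pvStepA (PySem.Dict.ofList m) c := by
          unfold pvStepA
          cases hg : (PySem.Dict.ofList m).get? (String.ofList [c]) with
          | none => rfl
          | some t => by_cases ht : t = "" <;> simp [ht]
        rw [hstep, foldl_append_shift ("" ++ pvStepA (PySem.Dict.ofList m) c)]
        simp [String.append_assoc]
    rw [hfold s.toList ""]
    simp [String.ofList_nil]
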